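-- pv_equiv track=rewrite | github.com/raphkim/advent-of-code | 2023/day-03/solution.py | find_left_and_right
-- ===== SOURCE A (Python) =====
-- numbers = {'0', '1', '2', '3', '4', '5', '6', '7', '8', '9'}
--
-- def find_left_and_right(_lines, _i, _j):
--     _curr = _j - 1
--     _left = ''
--     while _curr >= 0 and _lines[_i][_curr] in numbers:
--         _left = _lines[_i][_curr] + _left
--         _curr -= 1
--
--     _curr = _j + 1
--     _right = ''
--     while _curr < len(_lines[_i]) and _lines[_i][_curr] in numbers:
--         _right += _lines[_i][_curr]
--         _curr += 1
--
--     return _left, _right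
-- ===== SOURCE B (Python) =====
-- DIGITS = '0123456789'
--
-- def find_left_and_right(_lines, _i, _j):
--     row = _lines[_i]
--     left = right = ''
--     if _j >= 1 and row[_j - 1] in DIGITS:
--         before = row[:_j]
--         left = before[len(before.rstrip(DIGITS)):]
--     if _j + 1 < len(row) and row[_j + 1] in DIGITS:
--         after = row[_j + 1:]
--         right = after[:len(after) - len(after.lstrip(DIGITS))]
--     return left, right
-- ===== Notes on version B (the rewrite author's own statement) =====
-- stated objective: idiomatic
-- what changed: Replaced A's two index-by-index while loops with a neighbour peek plus slicing: if the char next to position _j is a digit, the left run is cut from row[:_j] via rstrip('0123456789') length arithmetic and the right run from row[_j+1:] via lstrip('0123456789').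
-- intended difference: On _j <= -2 with row[_j+1:] all digits and row[0] a digit (inputs A accepts), A's right scan wraps past the row end via Python negative indexing and returns row[_j+1:] plus a second pass over the row's leading digits, while B returns just the digit run row[_j+1:]; B's is intended because a grid column index is never negative and the wraparound is an accident of A's indexing. — e.g. on find_left_and_right(["12"], 0, -2): A returns ("", "212"), B returns ("", "2")
import Mathlib
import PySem

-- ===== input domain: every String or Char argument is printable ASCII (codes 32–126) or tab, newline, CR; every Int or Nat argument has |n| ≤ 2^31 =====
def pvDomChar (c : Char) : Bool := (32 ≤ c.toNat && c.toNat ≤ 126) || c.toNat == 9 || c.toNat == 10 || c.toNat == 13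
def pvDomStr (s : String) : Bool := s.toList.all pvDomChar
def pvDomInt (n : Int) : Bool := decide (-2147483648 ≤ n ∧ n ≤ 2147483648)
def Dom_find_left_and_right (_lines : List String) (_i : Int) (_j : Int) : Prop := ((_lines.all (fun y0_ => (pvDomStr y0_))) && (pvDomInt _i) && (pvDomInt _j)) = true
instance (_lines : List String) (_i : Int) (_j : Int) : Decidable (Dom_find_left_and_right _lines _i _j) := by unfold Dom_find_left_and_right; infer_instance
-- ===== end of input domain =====

-- B replaces A's two index-by-index while loops by a neighbour peek plus slicing: if the char
-- next to the position is a digit, the run is cut out of row[:_j] / row[_j+1:] with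
-- rstrip('0123456789') / lstrip('0123456789') length arithmetic (objective: idiomatic; same cost).


-- ===== PORT A =====
-- membership in the set literal `numbers` = {'0',…,'9'}
def pvDig (c : Char) : Bool := ("0123456789".toList).contains c

-- the first while loop: _curr counts down from _j-1, prepending digits
def pvA_left (row : List Char) (curr : Int) (left : List Char) : List Char :=
  if 0 ≤ curr then
    match PySem.List.pyGet? row curr with
    | some c => if pvDig c then pvA_left row (curr - 1) (c :: left) else left
    | none => left   -- IndexError in Python; unreachable under Pre_
  else left
termination_by (curr + 1).toNat
decreasing_by omega

-- the second while loop: _curr counts up from _j+1, appending digits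
def pvA_right (row : List Char) (curr : Int) (right : List Char) : List Char :=
  if _h : curr < (row.length : Int) then
    match PySem.List.pyGet? row curr with
    | some c => if pvDig c then pvA_right row (curr + 1) (right ++ [c]) else right
    | none => right   -- IndexError in Python; unreachable under Pre_
  else right
termination_by ((row.length : Int) - curr).toNat
decreasing_by omega

def find_left_and_right (_lines : List String) (_i : Int) (_j : Int) : String × String :=
  let row := ((PySem.List.pyGet? _lines _i).getD "").toList   -- _lines[_i]; out of range raises, excluded by Pre_
  (String.ofList (pvA_left row (_j - 1) []), String.ofList (pvA_right row (_j + 1) []))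

-- ===== PORT B =====
-- s.rstrip('0123456789'): drop the trailing digit run (exact hand port of rstrip with a char set)
def pvRstripDig (l : List Char) : List Char := (l.reverse.dropWhile pvDig).reverse
-- s.lstrip('0123456789'): drop the leading digit run (exact hand port of lstrip with a char set)
def pvLstripDig (l : List Char) : List Char := l.dropWhile pvDig

def find_left_and_right_alt (_lines : List String) (_i : Int) (_j : Int) : String × String :=
  let row := ((PySem.List.pyGet? _lines _i).getD "").toList   -- _lines[_i]; out of range raises, excluded by Pre_
  -- 'if _j >= 1 and row[_j-1] in DIGITS'; row[_j-1] raising (pyGet? = none) is excluded by Pre_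
  let left :=
    if 1 ≤ _j ∧ (PySem.List.pyGet? row (_j - 1)).any pvDig then
      let before := PySem.List.slice row none (some _j)
      PySem.List.slice before (some ((pvRstripDig before).length : Int)) none
    else []
  -- 'if _j + 1 < len(row) and row[_j+1] in DIGITS'; row[_j+1] raising is excluded by Pre_
  let right :=
    if _j + 1 < (row.length : Int) ∧ (PySem.List.pyGet? row (_j + 1)).any pvDig then
      let after := PySem.List.slice row (some (_j + 1)) none
      PySem.List.slice after none (some ((after.length : Int) - ((pvLstripDig after).length : Int)))
    else []
  (String.ofList left, String.ofList right)

-- ===== PRECONDITION & SPEC =====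
-- Pre_ is exactly where A returns normally: _i a valid (possibly negative, Python-style) row index
-- and -(len(row)+1) ≤ _j ≤ len(row); outside that range one of A's two loops indexes the row out
-- of range and raises IndexError (B's neighbour peeks raise on exactly the same inputs).
def Pre_find_left_and_right (_lines : List String) (_i : Int) (_j : Int) : Prop :=
  PySem.Raise.InRange _lines.length _i ∧
    -((((PySem.List.pyGet? _lines _i).getD "").toList.length : Int) + 1) ≤ _j ∧
    _j ≤ ((((PySem.List.pyGet? _lines _i).getD "").toList).length : Int)
instance (_lines : List String) (_i : Int) (_j : Int) : Decidable (Pre_find_left_and_right _lines _i _j) := by unfold Pre_find_left_and_right; infer_instance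

def pvWitness_find_left_and_right : List String × Int × Int := (["a12*34b"], 0, 3)

-- On _j ≤ -2 with row[_j+1:] all digits and row[0] a digit (inputs A accepts), A's right-hand
-- scan wraps past the end of the row via Python negative indexing and returns row[_j+1:] plus a
-- second pass over the row's leading digits, while B returns just the digit run row[_j+1:];
-- B's is intended because a grid column index is never negative and the wraparound is an
-- accident of A's indexing.
def D_find_left_and_right (_lines : List String) (_i : Int) (_j : Int) : Prop :=
  let s := (PySem.List.pyGet? _lines _i).getD ""
  _j ≤ -2 ∧ (PySem.Str.strIsdigit (PySem.Str.slice s (some (_j + 1)) none) &&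
    (PySem.Str.pyGet? s 0).any PySem.Chars.isdigit) = true
instance (_lines : List String) (_i : Int) (_j : Int) : Decidable (D_find_left_and_right _lines _i _j) := by unfold D_find_left_and_right; infer_instance

def Spec_find_left_and_right (_lines : List String) (_i : Int) (_j : Int) (out : String × String) : Prop := ¬ D_find_left_and_right _lines _i _j → out = find_left_and_right_alt _lines _i _j
instance (_lines : List String) (_i : Int) (_j : Int) (out : String × String) : Decidable (Spec_find_left_and_right _lines _i _j out) := by unfold Spec_find_left_and_right; infer_instance

def pvDiffWitness_find_left_and_right : List String × Int × Int := (["12"], 0, -2)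
def pvDiffWitnessOut_find_left_and_right : (String × String) × (String × String) := (("", "212"), ("", "2"))

-- ===== CLAIM (what is proved, stated in full; the proofs are below) =====
def Claim_unchanged_find_left_and_right : Prop := ∀ (_lines : List String) (_i : Int) (_j : Int), Dom_find_left_and_right _lines _i _j → Pre_find_left_and_right _lines _i _j → Spec_find_left_and_right _lines _i _j (find_left_and_right _lines _i _j)
def Claim_changed_find_left_and_right : Prop := Dom_find_left_and_right (pvDiffWitness_find_left_and_right.1) (pvDiffWitness_find_left_and_right.2.1) (pvDiffWitness_find_left_and_right.2.2) ∧ Pre_find_left_and_right (pvDiffWitness_find_left_and_right.1) (pvDiffWitness_find_left_and_right.2.1) (pvDiffWitness_find_left_and_right.2.2) ∧ D_find_left_and_right (pvDiffWitness_find_left_and_right.1) (pvDiffWitness_find_left_and_right.2.1) (pvDiffWitness_find_left_and_right.2.2) ∧ find_left_and_right (pvDiffWitness_find_left_and_right.1) (pvDiffWitness_find_left_and_right.2.1) (pvDiffWitness_find_left_and_right.2.2) = pvDiffWitnessOut_find_left_and_right.1 ∧ find_left_and_right_alt (pvDiffWitness_find_left_and_right.1) (pvDiffWitness_find_left_and_right.2.1)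 (pvDiffWitness_find_left_and_right.2.2) = pvDiffWitnessOut_find_left_and_right.2 ∧ pvDiffWitnessOut_find_left_and_right.1 ≠ pvDiffWitnessOut_find_left_and_right.2
def Claim_exact_find_left_and_right : Prop := ∀ (_lines : List String) (_i : Int) (_j : Int), Dom_find_left_and_right _lines _i _j → Pre_find_left_and_right _lines _i _j → D_find_left_and_right _lines _i _j → find_left_and_right _lines _i _j ≠ find_left_and_right_alt _lines _i _j

-- ===== LEMMAS AND PROOFS =====

-- PySem's char isdigit is exactly membership in A's digit set
theorem dig_eq (c : Char) : pvDig c = PySem.Chars.isdigit c := by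
  rw [Bool.eq_iff_iff]
  unfold pvDig PySem.Chars.isdigit
  simp only [List.contains_iff_mem, Bool.and_eq_true, decide_eq_true_eq]
  rw [show "0123456789".toList = ['0','1','2','3','4','5','6','7','8','9'] from rfl]
  simp only [List.mem_cons, List.not_mem_nil, or_false]
  constructor
  · rintro (rfl|rfl|rfl|rfl|rfl|rfl|rfl|rfl|rfl|rfl) <;> exact ⟨by decide, by decide⟩
  · rintro ⟨h1, h2⟩
    have hn1 : 48 ≤ c.val.toNat := h1
    have hn2 : c.val.toNat ≤ 57 := h2
    have hv : c.val.toNat = 48 ∨ c.val.toNat = 49 ∨ c.val.toNat = 50 ∨ c.val.toNat = 51 ∨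
        c.val.toNat = 52 ∨ c.val.toNat = 53 ∨ c.val.toNat = 54 ∨ c.val.toNat = 55 ∨
        c.val.toNat = 56 ∨ c.val.toNat = 57 := by omega
    have hchar : ∀ (d : Char), c.val.toNat = d.val.toNat → c = d := by
      intro d hd
      exact Char.ext (UInt32.toNat_inj.mp hd)
    rcases hv with h|h|h|h|h|h|h|h|h|h
    · exact Or.inl (hchar '0' h)
    · exact Or.inr (Or.inl (hchar '1' h))
    · exact Or.inr (Or.inr (Or.inl (hchar '2' h)))
    · exact Or.inr (Or.inr (Or.inr (Or.inl (hchar '3' h))))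
    · exact Or.inr (Or.inr (Or.inr (Or.inr (Or.inl (hchar '4' h)))))
    · exact Or.inr (Or.inr (Or.inr (Or.inr (Or.inr (Or.inl (hchar '5' h))))))
    · exact Or.inr (Or.inr (Or.inr (Or.inr (Or.inr (Or.inr (Or.inl (hchar '6' h)))))))
    · exact Or.inr (Or.inr (Or.inr (Or.inr (Or.inr (Or.inr (Or.inr (Or.inl (hchar '7' h))))))))
    · exact Or.inr (Or.inr (Or.inr (Or.inr (Or.inr (Or.inr (Or.inr (Or.inr (Or.inl (hchar '8' h)))))))))
    · exact Or.inr (Or.inr (Or.inr (Or.inr (Or.inr (Or.inr (Or.inr (Or.inr (Or.inr (hchar '9' h)))))))))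

-- evaluating D_'s slice test: s[_j+1:].isdigit() for _j+1 = -k
theorem c2_iff (s : String) (k : Nat) (h1 : 1 ≤ k) (h2 : k ≤ s.toList.length) :
    (PySem.Str.strIsdigit (PySem.Str.slice s (some (-(k : Int))) none) = true)
      ↔ ∀ c ∈ s.toList.drop (s.toList.length - k), pvDig c = true := by
  rw [PySem.Str.strIsdigit_eq, PySem.Str.toList_slice, PySem.Chars.slice_eq_listSlice,
    PySem.List.slice_from_neg_natCast _ k (by omega)]
  have hne : (s.toList.drop (s.toList.length - k)).isEmpty = false := by
    cases he : (s.toList.drop (s.toList.length - k)).isEmpty with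
    | false => rfl
    | true =>
      exfalso
      have h3 := List.isEmpty_iff.mp he
      have h4 := congrArg List.length h3
      rw [List.length_drop] at h4
      simp only [List.length_nil] at h4
      omega
  simp only [PySem.Chars.strIsdigit, hne, Bool.not_false, Bool.true_and, List.all_eq_true]
  constructor
  · intro h c hc
    rw [dig_eq]
    exact h c hc
  · intro h c hc
    rw [← dig_eq]
    exact h c hc

-- evaluating D_'s char test: s[0] is a digit
theorem c3_iff (s : String) :
    ((PySem.Str.pyGet? s 0).any PySem.Chars.isdigit = true)
      ↔ 0 < s.toList.length ∧ pvDig (s.toList.getD 0 ' ') = true := by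
  rw [PySem.Str.pyGet?_eq, PySem.Chars.pyGet?_eq_listPyGet?, PySem.List.pyGet?_zero]
  by_cases h0 : 0 < s.toList.length
  · rw [List.getElem?_eq_getElem h0]
    simp only [Option.any_some]
    rw [← dig_eq, List.getD_eq_getElem s.toList ' ' h0]
    exact ⟨fun h => ⟨h0, h⟩, fun h => h.2⟩
  · rw [List.getElem?_eq_none (by omega)]
    simp only [Option.any_none]
    exact ⟨fun h => by simp at h, fun h => absurd h.1 h0⟩

-- unpack D_ into its two tests
theorem D_unpack (_lines : List String) (_i : Int) (_j : Int) :
    D_find_left_and_right _lines _i _j ↔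
      (_j ≤ -2 ∧
        PySem.Str.strIsdigit (PySem.Str.slice ((PySem.List.pyGet? _lines _i).getD "")
          (some (_j + 1)) none) = true ∧
        (PySem.Str.pyGet? ((PySem.List.pyGet? _lines _i).getD "") 0).any
          PySem.Chars.isdigit = true) := by
  unfold D_find_left_and_right
  dsimp only
  simp only [Bool.and_eq_true, and_assoc]

-- left loop with a negative start returns its accumulator at once
theorem pvA_left_neg (row : List Char) (c : Int) (acc : List Char) (h : c < 0) :
    pvA_left row c acc = acc := by
  rw [pvA_left, if_neg (by omega)]

-- A's left loop computes the reversed digit-run at the end of row.take j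
theorem pvA_left_eq (row : List Char) (j : Nat) (hj : j ≤ row.length) (acc : List Char) :
    pvA_left row ((j : Int) - 1) acc
      = ((row.take j).reverse.takeWhile pvDig).reverse ++ acc := by
  induction j generalizing acc with
  | zero => simp [pvA_left]
  | succ n ih =>
    have hn : n < row.length := by omega
    have hc : ((n + 1 : Nat) : Int) - 1 = (n : Int) := by push_cast; ring
    rw [hc, pvA_left]
    have hget : PySem.List.pyGet? row (n : Int) = some row[n] :=
      PySem.List.pyGet?_ofNat row n hn
    rw [if_pos (by positivity), hget]
    have htake : row.take (n + 1) = row.take n ++ [row[n]] := by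
      rw [List.take_succ, List.getElem?_eq_getElem hn]; rfl
    dsimp only
    by_cases hd : pvDig row[n]
    · rw [if_pos hd, ih (by omega), htake, List.reverse_append, List.reverse_singleton,
        List.singleton_append, List.takeWhile_cons_of_pos hd, List.reverse_cons,
        List.append_assoc, List.singleton_append]
    · rw [if_neg hd, htake, List.reverse_append, List.reverse_singleton, List.singleton_append,
        List.takeWhile_cons_of_neg hd, List.reverse_nil, List.nil_append]

-- A's right loop from a nonnegative start computes acc ++ leading digit run of row.drop c
theorem pvA_right_eq (fuel : Nat) (row : List Char) (c : Nat) (hc : row.length - c = fuel)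
    (acc : List Char) :
    pvA_right row (c : Int) acc = acc ++ (row.drop c).takeWhile pvDig := by
  induction fuel generalizing c acc with
  | zero =>
    have : row.length ≤ c := by omega
    rw [pvA_right]
    rw [dif_neg (by exact_mod_cast by omega)]
    simp [List.drop_eq_nil_of_le this]
  | succ n ih =>
    have hlt : c < row.length := by omega
    rw [pvA_right, dif_pos (by exact_mod_cast hlt)]
    have hget : PySem.List.pyGet? row (c : Int) = some row[c] :=
      PySem.List.pyGet?_ofNat row c hlt
    rw [hget]
    have hdrop : row.drop c = row[c] :: row.drop (c + 1) :=
      List.drop_eq_getElem_cons hlt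
    dsimp only
    by_cases hd : pvDig row[c]
    · rw [if_pos hd]
      have hc1 : ((c : Int)) + 1 = ((c + 1 : Nat) : Int) := by push_cast; ring
      rw [hc1, ih (c + 1) (by omega), hdrop, List.takeWhile_cons_of_pos hd,
        List.append_assoc, List.singleton_append]
    · rw [if_neg hd, hdrop, List.takeWhile_cons_of_neg hd, List.append_nil]

-- A's right loop from a negative start -k wraps: it scans row[len-k:] and then row again
theorem pvA_right_neg (row : List Char) (k : Nat) (h1 : 1 ≤ k) (h2 : k ≤ row.length)
    (acc : List Char) :
    pvA_right row (-(k : Int)) acc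
      = acc ++ (row.drop (row.length - k) ++ row).takeWhile pvDig := by
  induction k generalizing acc with
  | zero => omega
  | succ k ih =>
    have hn : 1 ≤ row.length := by omega
    have hik : row.length - (k + 1) < row.length := by omega
    rw [pvA_right, dif_pos (by push_cast; omega)]
    have hget : PySem.List.pyGet? row (-((k + 1 : Nat) : Int))
        = some row[row.length - (k + 1)] := by
      rw [PySem.List.pyGet?_neg_natCast row (k + 1) (by omega) h2, List.getElem?_eq_getElem hik]
    rw [hget]
    have hdrop : row.drop (row.length - (k + 1))
        = row[row.length - (k + 1)] :: row.drop (row.length - k) := by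
      rw [List.drop_eq_getElem_cons hik,
        show row.length - (k + 1) + 1 = row.length - k from by omega]
    dsimp only
    by_cases hd : pvDig row[row.length - (k + 1)]
    · rw [if_pos hd]
      by_cases hk : k = 0
      · subst hk
        rw [show -((1 : Nat) : Int) + 1 = ((0 : Nat) : Int) by norm_num,
          pvA_right_eq row.length row 0 (by omega), hdrop]
        simp [hd]
      · rw [show -((k + 1 : Nat) : Int) + 1 = -((k : Nat) : Int) by push_cast; ring,
          ih (by omega) (by omega), hdrop, List.cons_append,
          List.takeWhile_cons_of_pos hd, List.append_assoc, List.singleton_append]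
    · rw [if_neg hd, hdrop, List.cons_append, List.takeWhile_cons_of_neg hd, List.append_nil]

-- dropping the rstrip-remainder's length keeps exactly the trailing digit run
theorem drop_rstrip_len (l : List Char) :
    l.drop (pvRstripDig l).length = (l.reverse.takeWhile pvDig).reverse := by
  unfold pvRstripDig
  have h1 : l = (l.reverse.dropWhile pvDig).reverse ++ (l.reverse.takeWhile pvDig).reverse := by
    conv_lhs => rw [← List.reverse_reverse l,
      ← List.takeWhile_append_dropWhile (p := pvDig) (l := l.reverse)]
    rw [List.reverse_append]
  calc l.drop ((l.reverse.dropWhile pvDig).reverse).length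
      = ((l.reverse.dropWhile pvDig).reverse ++ (l.reverse.takeWhile pvDig).reverse).drop
          ((l.reverse.dropWhile pvDig).reverse).length := by rw [← h1]
    _ = (l.reverse.takeWhile pvDig).reverse := List.drop_left

-- taking (len − lstrip-remainder length) keeps exactly the leading digit run
theorem take_lstrip_len (l : List Char) :
    l.take (l.length - (pvLstripDig l).length) = l.takeWhile pvDig := by
  unfold pvLstripDig
  have hsplit : l = l.takeWhile pvDig ++ l.dropWhile pvDig := (List.takeWhile_append_dropWhile).symm
  have hlen : l.length - (l.dropWhile pvDig).length = (l.takeWhile pvDig).length := by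
    have := congrArg List.length hsplit
    simp only [List.length_append] at this
    omega
  rw [hlen]
  have hp : l.takeWhile pvDig <+: l := List.takeWhile_prefix pvDig
  exact (List.prefix_iff_eq_take.mp hp).symm

-- peeling the last element of a nonempty take
theorem take_reverse_cons (row : List Char) (i : Nat) (hi : i < row.length) :
    (row.take (i + 1)).reverse = row[i] :: (row.take i).reverse := by
  rw [List.take_succ, List.getElem?_eq_getElem hi]
  simp

-- B's left branch when the guard is true is the trailing digit run of row.take _j
theorem b_left_eval (row : List Char) (_j : Int) :
    (PySem.List.slice (PySem.List.slice row none (some _j))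
        (some (((pvRstripDig (PySem.List.slice row none (some _j))).length : Int))) none)
      = ((PySem.List.slice row none (some _j)).reverse.takeWhile pvDig).reverse := by
  rw [PySem.List.slice_from_natCast, drop_rstrip_len]

-- B's right branch when the guard is true is the leading digit run of the tail slice
theorem b_right_eval (row : List Char) (a : Int) :
    (PySem.List.slice (PySem.List.slice row (some a) none) none
        (some (((PySem.List.slice row (some a) none).length : Int)
          - ((pvLstripDig (PySem.List.slice row (some a) none)).length : Int))))
      = (PySem.List.slice row (some a) none).takeWhile pvDig := by
  set after := PySem.List.slice row (some a) none with hafter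
  have hlen2 : (pvLstripDig after).length ≤ after.length := by
    unfold pvLstripDig; exact List.length_dropWhile_le _ _
  rw [show ((after.length : Int) - ((pvLstripDig after).length : Int))
      = ((after.length - (pvLstripDig after).length : Nat) : Int) by push_cast [hlen2]; ring]
  rw [PySem.List.slice_to_natCast, take_lstrip_len]

-- ===== VERDICT (by name: the statement is the Claim_ definition above) =====
theorem find_left_and_right_spec : Claim_unchanged_find_left_and_right := by
  intro _lines _i _j _hdom hpre
  obtain ⟨hi, hjlo, hjhi⟩ := hpre
  unfold Spec_find_left_and_right
  intro hnD
  rw [D_unpack] at hnD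
  unfold find_left_and_right find_left_and_right_alt
  dsimp only
  set row := ((PySem.List.pyGet? _lines _i).getD "").toList with hrow
  -- left components agree
  have hL : pvA_left row (_j - 1) []
      = (if 1 ≤ _j ∧ (PySem.List.pyGet? row (_j - 1)).any pvDig then
          PySem.List.slice (PySem.List.slice row none (some _j))
            (some (((pvRstripDig (PySem.List.slice row none (some _j))).length : Int))) none
        else []) := by
    by_cases hg : 1 ≤ _j ∧ (PySem.List.pyGet? row (_j - 1)).any pvDig
    · rw [if_pos hg, b_left_eval]
      obtain ⟨j, rfl⟩ : ∃ j : Nat, _j = (j : Int) := ⟨_j.toNat, by omega⟩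
      have hjlen : j ≤ row.length := by exact_mod_cast hjhi
      rw [pvA_left_eq row j hjlen [], PySem.List.slice_to_natCast, List.append_nil]
    · rw [if_neg hg]
      by_cases hj1 : _j < 1
      · exact pvA_left_neg _ _ _ (by omega)
      · push_neg at hj1
        obtain ⟨j, rfl⟩ : ∃ j : Nat, _j = (j : Int) := ⟨_j.toNat, by omega⟩
        have hj1' : 1 ≤ j := by exact_mod_cast hj1
        have hjlen : j ≤ row.length := by exact_mod_cast hjhi
        have hlt : j - 1 < row.length := by omega
        have hget : PySem.List.pyGet? row ((j : Int) - 1) = some row[j - 1] := by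
          rw [show ((j : Int) - 1) = ((j - 1 : Nat) : Int) by push_cast [hj1']; ring]
          exact PySem.List.pyGet?_ofNat row (j - 1) hlt
        have hnd : ¬ pvDig row[j - 1] = true := by
          intro hdg
          exact hg ⟨by exact_mod_cast hj1, by rw [hget]; simpa using hdg⟩
        rw [pvA_left_eq row j hjlen [], List.append_nil,
          show j = (j - 1) + 1 by omega, take_reverse_cons row (j - 1) hlt,
          List.takeWhile_cons_of_neg hnd, List.reverse_nil]
  -- right components agree
  have hR : pvA_right row (_j + 1) []
      = (if _j + 1 < (row.length : Int) ∧ (PySem.List.pyGet? row (_j + 1)).any pvDig then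
          PySem.List.slice (PySem.List.slice row (some (_j + 1)) none) none
            (some (((PySem.List.slice row (some (_j + 1)) none).length : Int)
              - ((pvLstripDig (PySem.List.slice row (some (_j + 1)) none)).length : Int)))
        else []) := by
    by_cases hj0 : 0 ≤ _j
    · -- nonnegative column: no wraparound anywhere
      obtain ⟨j, rfl⟩ : ∃ j : Nat, _j = (j : Int) := ⟨_j.toNat, by omega⟩
      have hjlen : j ≤ row.length := by exact_mod_cast hjhi
      rw [show ((j : Int) + 1) = ((j + 1 : Nat) : Int) by push_cast; ring,
        pvA_right_eq (row.length - (j + 1)) row (j + 1) rfl [], List.nil_append]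
      by_cases hg : ((j + 1 : Nat) : Int) < (row.length : Int) ∧
          (PySem.List.pyGet? row ((j + 1 : Nat) : Int)).any pvDig
      · rw [if_pos hg, b_right_eval row ((j + 1 : Nat) : Int), PySem.List.slice_from_natCast]
      · rw [if_neg hg]
        by_cases hlt : j + 1 < row.length
        · have hget : PySem.List.pyGet? row ((j + 1 : Nat) : Int) = some row[j + 1] :=
            PySem.List.pyGet?_ofNat row (j + 1) hlt
          have hnd : ¬ pvDig row[j + 1] = true := by
            intro hdg
            exact hg ⟨by exact_mod_cast hlt, by rw [hget]; simpa using hdg⟩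
          rw [List.drop_eq_getElem_cons hlt, List.takeWhile_cons_of_neg hnd]
        · rw [List.drop_eq_nil_of_le (by omega), List.takeWhile_nil]
    · push_neg at hj0
      by_cases hj1 : _j = -1
      · subst hj1
        rw [show (-1 : Int) + 1 = ((0 : Nat) : Int) by norm_num,
          pvA_right_eq row.length row 0 (by omega), List.drop_zero, List.nil_append]
        by_cases hg : ((0 : Nat) : Int) < (row.length : Int) ∧
            (PySem.List.pyGet? row ((0 : Nat) : Int)).any pvDig
        · rw [if_pos hg, b_right_eval row ((0 : Nat) : Int), PySem.List.slice_from_natCast,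
            List.drop_zero]
        · rw [if_neg hg]
          by_cases h0 : 0 < row.length
          · have hget : PySem.List.pyGet? row ((0 : Nat) : Int) = some row[0] :=
              PySem.List.pyGet?_ofNat row 0 h0
            have hnd : ¬ pvDig row[0] = true := by
              intro hdg
              exact hg ⟨by exact_mod_cast h0, by rw [hget]; simpa using hdg⟩
            have hrow0 : row = row[0] :: row.drop 1 := by
              have h := List.drop_eq_getElem_cons (l := row) (i := 0) h0
              simpa using h
            conv_lhs => rw [hrow0]
            rw [List.takeWhile_cons_of_neg hnd]
          · have hrownil : row = [] := List.eq_nil_of_length_eq_zero (by omega)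
            rw [hrownil, List.takeWhile_nil]
      · -- _j ≤ -2: A wraps; by ¬D the wrap contributes nothing
        have hj2 : _j ≤ -2 := by omega
        have hn1 : 1 ≤ row.length := by omega
        obtain ⟨k, hk⟩ : ∃ k : Nat, _j = -(k : Int) := ⟨(-_j).toNat, by omega⟩
        have hk1 : 2 ≤ k := by omega
        have hkn : k ≤ row.length + 1 := by omega
        have hk' : k - 1 ≤ row.length := by omega
        have hk'1 : 1 ≤ k - 1 := by omega
        have hstep : _j + 1 = -((k - 1 : Nat) : Int) := by push_cast [hk'1]; omega
        have hidx : row.length - (k - 1) < row.length := by omega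
        have hgetw : PySem.List.pyGet? row (-((k - 1 : Nat) : Int))
            = some row[row.length - (k - 1)] := by
          rw [PySem.List.pyGet?_neg_natCast row (k - 1) (by omega) hk',
            List.getElem?_eq_getElem hidx]
        rw [hstep, pvA_right_neg row (k - 1) hk'1 hk' [], List.nil_append]
        have hsdrop : row.drop (row.length - (k - 1))
            = row[row.length - (k - 1)] :: row.drop (row.length - (k - 1) + 1) :=
          List.drop_eq_getElem_cons hidx
        by_cases hd : pvDig row[row.length - (k - 1)]
        · -- the first scanned char is a digit: guard true; the wrap is cut off by ¬D
          rw [if_pos (show -((k - 1 : Nat) : Int) < (row.length : Int) ∧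
                (PySem.List.pyGet? row (-((k - 1 : Nat) : Int))).any pvDig from
              ⟨by omega, by rw [hgetw]; simpa using hd⟩),
            b_right_eval row (-((k - 1 : Nat) : Int)),
            PySem.List.slice_from_neg_natCast row (k - 1) (by omega)]
          set s := row.drop (row.length - (k - 1)) with hs
          rw [List.takeWhile_append]
          split_ifs with hall
          · have hsall : ∀ c ∈ s, pvDig c = true := by
              have := List.IsPrefix.eq_of_length (List.takeWhile_prefix pvDig) hall
              intro c hc
              rw [← this] at hc
              exact List.mem_takeWhile_imp hc
            have h0 : 0 < row.length := by omega
            have hnd0 : ¬ pvDig row[0] = true := by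
              intro hdg
              apply hnD
              refine ⟨hj2, ?_, ?_⟩
              · rw [hstep]
                refine (c2_iff _ (k - 1) hk'1 (by rw [← hrow]; exact hk')).mpr ?_
                intro c hc
                rw [← hrow] at hc
                exact hsall c hc
              · refine (c3_iff _).mpr ?_
                rw [← hrow]
                exact ⟨h0, by rw [List.getD_eq_getElem row ' ' h0]; exact hdg⟩
            have hrow0 : row = row[0] :: row.drop 1 := by
              have h := List.drop_eq_getElem_cons (l := row) (i := 0) h0
              simpa using h
            rw [hrow0, List.takeWhile_cons_of_neg hnd0, List.append_nil,
              List.IsPrefix.eq_of_length (List.takeWhile_prefix pvDig) hall]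
          · rfl
        · -- the first scanned char is not a digit: both runs are empty
          rw [if_neg (show ¬(-((k - 1 : Nat) : Int) < (row.length : Int) ∧
                (PySem.List.pyGet? row (-((k - 1 : Nat) : Int))).any pvDig) from by
            rintro ⟨_, hdig⟩
            rw [hgetw] at hdig
            exact hd (by simpa using hdig))]
          rw [hsdrop, List.cons_append, List.takeWhile_cons_of_neg hd]
  rw [hL, hR]

theorem find_left_and_right_changed : Claim_changed_find_left_and_right := by
  unfold Claim_changed_find_left_and_right
  refine ⟨by decide, by decide, by decide, ?_, by decide, by decide⟩
  show find_left_and_right ["12"] 0 (-2) = ("", "212")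
  unfold find_left_and_right
  dsimp only
  rw [pvA_left_neg _ _ _ (by norm_num),
    show (-2 : Int) + 1 = -((1 : Nat) : Int) by norm_num,
    pvA_right_neg (((PySem.List.pyGet? (["12"] : List String) 0).getD "").toList) 1
      (by norm_num) (by decide)]
  decide

theorem find_left_and_right_tight : Claim_exact_find_left_and_right := by
  intro _lines _i _j _hdom hpre hD
  obtain ⟨hi, hjlo, hjhi⟩ := hpre
  rw [D_unpack] at hD
  obtain ⟨hj2, hb2, hb3⟩ := hD
  unfold find_left_and_right find_left_and_right_alt
  dsimp only
  set row := ((PySem.List.pyGet? _lines _i).getD "").toList with hrow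
  have htmp3 := (c3_iff ((PySem.List.pyGet? _lines _i).getD "")).mp hb3
  rw [← hrow] at htmp3
  obtain ⟨h0, hdg0⟩ := htmp3
  obtain ⟨k, hk⟩ : ∃ k : Nat, _j = -(k : Int) := ⟨(-_j).toNat, by omega⟩
  have hk1 : 2 ≤ k := by omega
  have hkn : k ≤ row.length + 1 := by omega
  have hk' : k - 1 ≤ row.length := by omega
  have hk'1 : 1 ≤ k - 1 := by omega
  have hstep : _j + 1 = -((k - 1 : Nat) : Int) := by push_cast [hk'1]; omega
  rw [hstep] at hb2
  have htmp2 := (c2_iff _ (k - 1) hk'1 (by rw [← hrow]; exact hk')).mp hb2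
  rw [← hrow] at htmp2
  have hidx : row.length - (k - 1) < row.length := by omega
  have hsdrop : row.drop (row.length - (k - 1))
      = row[row.length - (k - 1)] :: row.drop (row.length - (k - 1) + 1) :=
    List.drop_eq_getElem_cons hidx
  have hd : pvDig row[row.length - (k - 1)] = true :=
    htmp2 _ (by rw [hsdrop]; exact List.mem_cons_self)
  have hgetw : PySem.List.pyGet? row (-((k - 1 : Nat) : Int))
      = some row[row.length - (k - 1)] := by
    rw [PySem.List.pyGet?_neg_natCast row (k - 1) (by omega) hk',
      List.getElem?_eq_getElem hidx]
  rw [hstep, pvA_right_neg row (k - 1) hk'1 hk' [], List.nil_append]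
  rw [if_pos (show -((k - 1 : Nat) : Int) < (row.length : Int) ∧
        (PySem.List.pyGet? row (-((k - 1 : Nat) : Int))).any pvDig from
      ⟨by omega, by rw [hgetw]; simpa using hd⟩),
    b_right_eval row (-((k - 1 : Nat) : Int)),
    PySem.List.slice_from_neg_natCast row (k - 1) (by omega)]
  set s := row.drop (row.length - (k - 1)) with hs
  have hsall : ∀ c ∈ s, pvDig c = true := htmp2
  have htws : s.takeWhile pvDig = s := List.takeWhile_eq_self_iff.mpr hsall
  have hdg0' : pvDig row[0] = true := by
    rw [List.getD_eq_getElem row ' ' h0] at hdg0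
    exact hdg0
  have hrow0 : row = row[0] :: row.drop 1 := by
    have h := List.drop_eq_getElem_cons (l := row) (i := 0) h0
    simpa using h
  have hsplit : (s ++ row).takeWhile pvDig = s ++ row.takeWhile pvDig := by
    rw [List.takeWhile_append, htws, if_pos rfl]
  intro h
  have h2 := congrArg (fun p => p.2.toList) h
  dsimp at h2
  simp only [String.toList_ofList] at h2
  rw [hsplit, htws] at h2
  have hlen := congrArg List.length h2
  rw [List.length_append] at hlen
  have hpos : 0 < (row.takeWhile pvDig).length := by
    rw [hrow0, List.takeWhile_cons_of_pos hdg0']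
    simp
  omega
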